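-- pv_equiv track=rewrite | github.com/uelkerd/SAMO--DL | scripts/maintenance/fix_linting_issues_comprehensive.py | fix_import_order
-- ===== SOURCE A (Python) =====
-- def fix_import_order(content: str) -> str:
--     """Fix import order by moving all imports to the top."""
--     lines = content.split("\n")
--
--     import_lines = []
--     non_import_lines = []
--
--     for line in lines:
--         stripped = line.strip()
--         if (
--             stripped.startswith("import ")
--             or stripped.startswith("from ")
--             or stripped.startswith("#")
--         ):
--             import_lines.append(line)
--         else:
--             non_import_lines.append(line)
--
--     return "\n".join(import_lines + non_import_lines)
-- ===== SOURCE B (Python) =====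
-- def fix_import_order(content: str) -> str:
--     """Fix import order by moving all imports to the top."""
--     lines = content.split("\n")
--     return "\n".join(
--         sorted(
--             lines,
--             key=lambda line: not line.strip().startswith(("import ", "from ", "#")),
--         )
--     )
-- ===== Notes on version B (the rewrite author's own statement) =====
-- stated objective: idiomatic
-- what changed: Replaces the explicit two-accumulator partition loop with a single stable sorted() on a boolean key (import/comment lines key False, so they come first in original order), then joins.
import Mathlib
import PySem

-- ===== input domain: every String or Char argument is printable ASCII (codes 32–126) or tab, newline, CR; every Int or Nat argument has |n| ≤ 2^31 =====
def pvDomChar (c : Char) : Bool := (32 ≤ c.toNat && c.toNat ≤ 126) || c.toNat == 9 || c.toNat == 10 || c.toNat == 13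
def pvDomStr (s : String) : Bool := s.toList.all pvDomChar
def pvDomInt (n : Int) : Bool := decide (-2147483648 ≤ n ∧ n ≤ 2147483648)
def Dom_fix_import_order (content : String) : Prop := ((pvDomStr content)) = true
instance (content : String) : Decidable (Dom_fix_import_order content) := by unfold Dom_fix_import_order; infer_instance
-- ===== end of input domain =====

-- B replaces A's explicit two-list partition loop with one stable sort on a boolean key (more idiomatic); same result.


-- ===== PORT A =====
-- the classification predicate shared verbatim by both Pythons
def pvIsImportLine (line : String) : Bool :=
  let stripped := PySem.Str.strip line
  PySem.Str.startswith stripped "import " || PySem.Str.startswith stripped "from " ||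
    PySem.Str.startswith stripped "#"

def fix_import_order (content : String) : String :=
  let lines := (PySem.Str.split? content "\n").getD []   -- separator is the literal "\n" ≠ "", so never none
  let acc := lines.foldl
    (fun (acc : List String × List String) line =>
      if pvIsImportLine line then (acc.1 ++ [line], acc.2) else (acc.1, acc.2 ++ [line]))
    ([], [])
  PySem.Str.join "\n" (acc.1 ++ acc.2)

-- ===== PORT B =====
def fix_import_order_alt (content : String) : String :=
  let lines := (PySem.Str.split? content "\n").getD []
  PySem.Str.join "\n" (PySem.List.sorted lines (fun line => !pvIsImportLine line) false)

-- ===== PRECONDITION & SPEC =====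
def Spec_fix_import_order (content : String) (out : String) : Prop := out = fix_import_order_alt content
instance (content : String) (out : String) : Decidable (Spec_fix_import_order content out) := by unfold Spec_fix_import_order; infer_instance

-- ===== CLAIM (what is proved, stated in full; the proofs are below) =====
def Claim_equal_fix_import_order : Prop := ∀ (content : String), Dom_fix_import_order content → Spec_fix_import_order content (fix_import_order content)

-- ===== LEMMAS AND PROOFS =====

-- A's partition loop computes the two filters
theorem pv_foldl_partition (p : String → Bool) (lines : List String)
    (i n : List String) :
    lines.foldl
      (fun (acc : List String × List String) line =>
        if p line then (acc.1 ++ [line], acc.2) else (acc.1, acc.2 ++ [line])) (i, n)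
      = (i ++ lines.filter p, n ++ lines.filter (fun l => !p l)) := by
  induction lines generalizing i n with
  | nil => simp
  | cons x ls ih =>
    by_cases h : p x = true <;> simp [List.foldl_cons, h, ih]

-- inserting a false-key element lands right after the false-key block
theorem pv_insertBy_false (k : String → Bool) (x : String) (hx : k x = false)
    (F T : List String) (hF : ∀ y ∈ F, k y = false) (hT : ∀ y ∈ T, k y = true) :
    PySem.List.insertBy (fun a b => decide (k a < k b)) x (F ++ T) = F ++ x :: T := by
  induction F with
  | nil =>
    cases T with
    | nil => simp [PySem.List.insertBy]
    | cons t ts =>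
      have ht : k t = true := hT t (by simp)
      simp [PySem.List.insertBy, hx, ht]
  | cons f fs ih =>
    have hf : k f = false := hF f (by simp)
    simp only [List.cons_append, PySem.List.insertBy, hx, hf]
    simp [ih (fun y hy => hF y (by simp [hy]))]

-- a true-key element goes to the very end
theorem pv_insertBy_true (k : String → Bool) (x : String) (hx : k x = true)
    (ys : List String) :
    PySem.List.insertBy (fun a b => decide (k a < k b)) x ys = ys ++ [x] := by
  apply PySem.List.insertBy_of_forall_not_before
  intro y _
  simp [hx]

-- the stable insertion-sort loop on a boolean key is exactly the partition
theorem pv_sorted_partition (k : String → Bool) (lines F T : List String)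
    (hF : ∀ y ∈ F, k y = false) (hT : ∀ y ∈ T, k y = true) :
    lines.foldl
      (fun acc x => PySem.List.insertBy (fun a b => decide (k a < k b)) x acc) (F ++ T)
      = (F ++ lines.filter (fun l => !k l)) ++ (T ++ lines.filter k) := by
  induction lines generalizing F T with
  | nil => simp
  | cons x ls ih =>
    by_cases h : k x = true
    · have hT' : ∀ y ∈ T ++ [x], k y = true := by
        intro y hy
        rcases List.mem_append.1 hy with h' | h'
        · exact hT y h'
        · simp_all
      rw [List.foldl_cons, pv_insertBy_true k x h, List.append_assoc,
        ih F (T ++ [x]) hF hT']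
      simp [h]
    · have h' : k x = false := by simpa using h
      have hF' : ∀ y ∈ F ++ [x], k y = false := by
        intro y hy
        rcases List.mem_append.1 hy with h'' | h''
        · exact hF y h''
        · simp_all
      rw [List.foldl_cons, pv_insertBy_false k x h' F T hF hT]
      have hx : F ++ x :: T = (F ++ [x]) ++ T := by simp
      rw [hx, ih (F ++ [x]) T hF' hT]
      simp [h']

theorem pv_sorted_eq (k : String → Bool) (lines : List String) :
    PySem.List.sorted lines k false = lines.filter (fun l => !k l) ++ lines.filter k := by
  rw [PySem.List.sorted_eq_foldl_insertBy]
  have := pv_sorted_partition k lines [] [] (by simp) (by simp)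
  simpa using this

-- ===== VERDICT (by name: the statement is the Claim_ definition above) =====
theorem fix_import_order_spec : Claim_equal_fix_import_order := by
  intro content _
  show fix_import_order content = fix_import_order_alt content
  simp only [fix_import_order, fix_import_order_alt]
  rw [pv_foldl_partition, pv_sorted_eq]
  simp
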